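-- pv_equiv track=rewrite | github.com/JWdori/SpeechFeedback | preprocess.py | bracket_filter
-- ===== SOURCE A (Python) =====
-- def bracket_filter(sentence, mode='phonetic'):
--     new_sentence = str()
--
--     if mode == 'phonetic':
--         flag = False
--
--         for ch in sentence:
--             if ch == '(' and flag is False:
--                 flag = True
--                 continue
--             if ch == '(' and flag is True:
--                 flag = False
--                 continue
--             if ch != ')' and flag is False:
--                 new_sentence += ch
--
--     elif mode == 'spelling':
--         flag = True
--
--         for ch in sentence:
--             if ch == '(':
--                 continue
--             if ch == ')':
--                 if flag is True:
--                     flag = False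
--                     continue
--                 else:
--                     flag = True
--                     continue
--             if ch != ')' and flag is True:
--                 new_sentence += ch
--
--     else:
--         raise ValueError("Unsupported mode : {0}".format(mode))
--
--     return new_sentence
-- ===== SOURCE B (Python) =====
-- def bracket_filter(sentence, mode='phonetic'):
--     if mode == 'phonetic':
--         sep, drop = '(', ')'
--     elif mode == 'spelling':
--         sep, drop = ')', '('
--     else:
--         raise ValueError("Unsupported mode : {0}".format(mode))
--     parts = sentence.split(sep)
--     out = []
--     for i, p in enumerate(parts):
--         if i % 2 == 0:
--             out.append(''.join(ch for ch in p if ch != drop))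
--     return ''.join(out)
-- ===== Notes on version B (the rewrite author's own statement) =====
-- stated objective: simpler
-- what changed: Replaces A's per-character toggle-flag state machine with split-on-separator then keep the even-indexed segments (with the other bracket character filtered out of kept segments); Pre_ excludes unsupported modes, on which both A and B raise ValueError.
import Mathlib
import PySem

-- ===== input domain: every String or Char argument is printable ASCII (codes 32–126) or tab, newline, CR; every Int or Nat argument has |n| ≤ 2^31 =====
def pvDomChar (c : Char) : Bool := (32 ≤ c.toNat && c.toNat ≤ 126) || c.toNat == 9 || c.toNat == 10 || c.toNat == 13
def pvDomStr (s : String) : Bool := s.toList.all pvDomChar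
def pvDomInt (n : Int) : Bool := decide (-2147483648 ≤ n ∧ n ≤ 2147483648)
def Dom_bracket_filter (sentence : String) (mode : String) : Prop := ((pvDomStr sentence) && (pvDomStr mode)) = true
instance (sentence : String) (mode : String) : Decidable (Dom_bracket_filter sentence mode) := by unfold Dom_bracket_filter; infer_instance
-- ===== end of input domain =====

-- B replaces A's per-character toggle state machine by split-on-separator + keep even-indexed
-- segments (objective: simpler); equivalence proved for both supported modes; unsupported modes
-- raise ValueError in both Pythons and are excluded by Pre_.

-- ===== PORT A =====
-- A's phonetic loop: flag toggles on '(', a char is appended iff it is not ')' and flag is False.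
def pvPhonStep (st : Bool × List Char) (ch : Char) : Bool × List Char :=
  if ch = '(' ∧ st.1 = false then (true, st.2)
  else if ch = '(' ∧ st.1 = true then (false, st.2)
  else if ch ≠ ')' ∧ st.1 = false then (st.1, st.2 ++ [ch])
  else (st.1, st.2)

-- A's spelling loop: '(' skipped, ')' toggles flag, a char is appended iff flag is True.
def pvSpelStep (st : Bool × List Char) (ch : Char) : Bool × List Char :=
  if ch = '(' then (st.1, st.2)
  else if ch = ')' then (if st.1 = true then (false, st.2) else (true, st.2))
  else if ch ≠ ')' ∧ st.1 = true then (st.1, st.2 ++ [ch])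
  else (st.1, st.2)

def bracket_filter (sentence : String) (mode : String) : String :=
  if mode = "phonetic" then
    String.ofList (sentence.toList.foldl pvPhonStep (false, [])).2
  else if mode = "spelling" then
    String.ofList (sentence.toList.foldl pvSpelStep (true, [])).2
  else "" -- Python raises ValueError here; excluded by Pre_bracket_filter

-- ===== PORT B =====
-- Source B's loop over enumerate(parts): keep even-indexed parts with the 'drop' char filtered out.
def pvAltGo (sep drop : Char) (sentence : String) : String :=
  String.ofList (PySem.Chars.join []
    ((PySem.List.enumerate (sentence.toList.splitOn sep) 0).foldl
      (fun acc (ip : Int × List Char) =>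
        if ip.1 % 2 = 0 then acc ++ [ip.2.filter (· ≠ drop)] else acc) []))

def bracket_filter_alt (sentence : String) (mode : String) : String :=
  if mode = "phonetic" then pvAltGo '(' ')' sentence
  else if mode = "spelling" then pvAltGo ')' '(' sentence
  else "" -- Python raises ValueError here; excluded by Pre_bracket_filter

-- ===== PRECONDITION & SPEC =====
-- Pre_ excludes exactly the modes other than 'phonetic'/'spelling', on which A raises ValueError.
def Pre_bracket_filter (sentence : String) (mode : String) : Prop :=
  mode = "phonetic" ∨ mode = "spelling"
instance (sentence : String) (mode : String) : Decidable (Pre_bracket_filter sentence mode) := by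
  unfold Pre_bracket_filter; infer_instance

def pvWitness_bracket_filter : String × String := ("ab(cd)e(f)g", "phonetic")

def Spec_bracket_filter (sentence : String) (mode : String) (out : String) : Prop :=
  out = bracket_filter_alt sentence mode
instance (sentence : String) (mode : String) (out : String) : Decidable (Spec_bracket_filter sentence mode out) := by
  unfold Spec_bracket_filter; infer_instance

-- ===== CLAIM (what is proved, stated in full; the proofs are below) =====
def Claim_equal_bracket_filter : Prop := ∀ (sentence : String) (mode : String), Dom_bracket_filter sentence mode → Pre_bracket_filter sentence mode → Spec_bracket_filter sentence mode (bracket_filter sentence mode)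

-- ===== LEMMAS AND PROOFS =====

-- Common recursive specification: keep-flag k toggles on `sep`, `drop` is never kept,
-- any other char is kept iff k is true.
def pvGenRec (sep drop : Char) : Bool → List Char → List Char
  | _, [] => []
  | k, c :: cs =>
    if c = sep then pvGenRec sep drop (!k) cs
    else if c = drop then pvGenRec sep drop k cs
    else if k then c :: pvGenRec sep drop k cs
    else pvGenRec sep drop k cs

-- Segment-selection specification of B: keep a part iff the keep-flag is true, flag alternates.
def pvPick (drop : Char) : Bool → List (List Char) → List Char
  | _, [] => []
  | k, p :: ps => (if k then p.filter (· ≠ drop) else []) ++ pvPick drop (!k) ps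

theorem pvPhon_foldl (cs : List Char) (f : Bool) (acc : List Char) :
    (cs.foldl pvPhonStep (f, acc)).2 = acc ++ pvGenRec '(' ')' (!f) cs := by
  induction cs generalizing f acc with
  | nil => simp [pvGenRec]
  | cons c cs ih =>
    by_cases h1 : c = '('
    · subst h1
      cases f <;> simp [pvPhonStep, List.foldl_cons, ih, pvGenRec]
    · by_cases h2 : c = ')'
      · subst h2
        cases f <;> simp [pvPhonStep, List.foldl_cons, ih, pvGenRec]
      · cases f <;> simp [pvPhonStep, h1, h2, List.foldl_cons, ih, pvGenRec]

theorem pvSpel_foldl (cs : List Char) (f : Bool) (acc : List Char) :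
    (cs.foldl pvSpelStep (f, acc)).2 = acc ++ pvGenRec ')' '(' f cs := by
  induction cs generalizing f acc with
  | nil => simp [pvGenRec]
  | cons c cs ih =>
    by_cases h1 : c = '('
    · subst h1
      cases f <;> simp [pvSpelStep, List.foldl_cons, ih, pvGenRec]
    · by_cases h2 : c = ')'
      · subst h2
        cases f <;> simp [pvSpelStep, h1, List.foldl_cons, ih, pvGenRec]
      · cases f <;> simp [pvSpelStep, h1, h2, List.foldl_cons, ih, pvGenRec]

theorem pvJoinNil (l : List (List Char)) : PySem.Chars.join [] l = l.flatten := by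
  show (List.intersperse [] l).flatten = l.flatten
  induction l with
  | nil => rfl
  | cons a t ih => cases t <;> simp_all [List.intersperse]

theorem pvGenRec_eq_pick (sep drop : Char) (hsd : sep ≠ drop) (cs : List Char) (k : Bool) :
    pvGenRec sep drop k cs = pvPick drop k (cs.splitOn sep) := by
  induction cs generalizing k with
  | nil => simp [pvGenRec, List.splitOn, List.splitOnP_nil, pvPick]
  | cons c cs ih =>
    show pvGenRec sep drop k (c :: cs) = pvPick drop k (List.splitOnP (· == sep) (c :: cs))
    rw [List.splitOnP_cons]
    have ihP : ∀ k', pvGenRec sep drop k' cs = pvPick drop k' (List.splitOnP (· == sep) cs) :=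
      fun k' => ih k'
    by_cases h1 : c = sep
    · rw [if_pos (by simp [h1]),
         show pvGenRec sep drop k (c :: cs) = pvGenRec sep drop (!k) cs from by
           simp [pvGenRec, h1],
         ihP]
      simp [pvPick]
    · rw [if_neg (by simp [h1])]
      cases hsp : List.splitOnP (· == sep) cs with
      | nil => exact absurd hsp (List.splitOnP_ne_nil _ _)
      | cons h t =>
        have ihc : pvGenRec sep drop k cs = pvPick drop k (h :: t) := by
          rw [ihP, hsp]
        by_cases h2 : c = drop
        · rw [show pvGenRec sep drop k (c :: cs) = pvGenRec sep drop k cs from by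
             simp [pvGenRec, h2, hsd.symm],
             ihc]
          cases k <;> simp [pvPick, List.modifyHead, List.filter, h2]
        · cases k with
          | false =>
            rw [show pvGenRec sep drop false (c :: cs) = pvGenRec sep drop false cs from by
               simp [pvGenRec, h1, h2], ihc]
            simp [pvPick, List.modifyHead]
          | true =>
            rw [show pvGenRec sep drop true (c :: cs) = c :: pvGenRec sep drop true cs from by
               simp [pvGenRec, h1, h2], ihc]
            simp [pvPick, List.modifyHead, List.filter, h2]

-- B's enumerate-fold, flattened, is exactly pvPick with keep-flag (s % 2 = 0).
theorem pvAlt_fold (drop : Char) (ps : List (List Char)) (s : Int) (acc : List (List Char)) :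
    ((PySem.List.enumerate ps s).foldl
        (fun acc (ip : Int × List Char) =>
          if ip.1 % 2 = 0 then acc ++ [ip.2.filter (· ≠ drop)] else acc) acc).flatten
      = acc.flatten ++ pvPick drop (decide (s % 2 = 0)) ps := by
  induction ps generalizing s acc with
  | nil => simp [PySem.List.enumerate, pvPick]
  | cons p ps ih =>
    rw [PySem.List.enumerate_cons, List.foldl_cons]
    by_cases hs : s % 2 = 0
    · have hs1 : ¬ ((s + 1) % 2 = 0) := by omega
      simp only [hs, ih]
      simp [pvPick, hs1]
    · have hs1 : (s + 1) % 2 = 0 := by omega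
      simp only [if_neg hs, ih]
      simp [pvPick, hs, hs1]

theorem pvAltGo_eq_pick (sep drop : Char) (sentence : String) :
    pvAltGo sep drop sentence
      = String.ofList (pvPick drop true (sentence.toList.splitOn sep)) := by
  unfold pvAltGo
  rw [pvJoinNil, pvAlt_fold drop (sentence.toList.splitOn sep) 0 []]
  rfl

-- ===== VERDICT (by name: the statement is the Claim_ definition above) =====
theorem bracket_filter_spec : Claim_equal_bracket_filter := by
  intro sentence mode _ hpre
  unfold Spec_bracket_filter
  rcases hpre with h | h <;> subst h
  · have hA : bracket_filter sentence "phonetic"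
        = String.ofList (pvGenRec '(' ')' true sentence.toList) := by
      unfold bracket_filter
      rw [if_pos rfl, pvPhon_foldl]
      rfl
    have hB : bracket_filter_alt sentence "phonetic"
        = String.ofList (pvPick ')' true (sentence.toList.splitOn '(')) := by
      unfold bracket_filter_alt
      rw [if_pos rfl, pvAltGo_eq_pick]
    rw [hA, hB, pvGenRec_eq_pick '(' ')' (by decide)]
  · have hA : bracket_filter sentence "spelling"
        = String.ofList (pvGenRec ')' '(' true sentence.toList) := by
      unfold bracket_filter
      rw [if_neg (by decide), if_pos rfl, pvSpel_foldl]
      rfl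
    have hB : bracket_filter_alt sentence "spelling"
        = String.ofList (pvPick '(' true (sentence.toList.splitOn ')')) := by
      unfold bracket_filter_alt
      rw [if_neg (by decide), if_pos rfl, pvAltGo_eq_pick]
    rw [hA, hB, pvGenRec_eq_pick ')' '(' (by decide)]
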